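-- pv_equiv track=rewrite | github.com/karenjexphd/classification_extraction_tests | MapToTableModel/map_tabbyxl.py | address2coords
-- ===== SOURCE A (Python) =====
-- import string
--
-- def address2coords(cell_address):
--     # Function to return (numeric) coordinates of a spreadsheet cell based on its address
--     # A3 will return (1,3)  AA43 will return (27,43)
--     col=''.join(filter(str.isalpha, cell_address))   # alpha part of cell address
--     row=int(''.join(filter(str.isdigit, cell_address)))  # numeric part of cell address
--     num = 0
--     for c in col:
--         if c in string.ascii_letters:
--             num = num * 26 + (ord(c.upper()) - ord('A')) + 1
--     return num,row
-- ===== SOURCE B (Python) =====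
-- import string
--
-- def address2coords(cell_address):
--     # Back-to-front single pass with place-value weights: walk the address
--     # reversed, adding each letter's value times the current power of 26
--     # (instead of A's two filter passes plus a forward Horner loop), and
--     # collecting digit characters, reversed back at the end for int().
--     num = 0
--     mul = 1
--     digits = []
--     for c in reversed(cell_address):
--         if c in string.ascii_letters:
--             num += (ord(c.upper()) - ord('A') + 1) * mul
--             mul *= 26
--         elif c.isdigit():
--             digits.append(c)
--     digits.reverse()
--     return num, int(''.join(digits))
-- ===== Notes on version B (the rewrite author's own statement) =====
-- stated objective: alternative
-- what changed: Replaces A's two filter passes plus a forward Horner loop over the letter part with a single reversed traversal that accumulates the column number via explicit place-value weights (powers of 26) and collects the digit characters on the way.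
import Mathlib
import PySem

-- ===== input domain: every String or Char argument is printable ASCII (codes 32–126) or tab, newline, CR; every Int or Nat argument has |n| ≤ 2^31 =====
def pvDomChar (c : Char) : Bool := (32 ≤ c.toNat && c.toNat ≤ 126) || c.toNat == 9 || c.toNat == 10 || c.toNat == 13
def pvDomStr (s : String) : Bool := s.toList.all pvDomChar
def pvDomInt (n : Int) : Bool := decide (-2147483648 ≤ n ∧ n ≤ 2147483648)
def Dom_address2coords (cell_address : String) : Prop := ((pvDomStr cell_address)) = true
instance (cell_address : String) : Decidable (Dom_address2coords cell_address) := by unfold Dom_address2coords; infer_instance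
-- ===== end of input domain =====

-- B walks the address back-to-front once, accumulating the column with place-value
-- weights (powers of 26) instead of A's two filter passes plus a forward Horner loop
-- (return value only; no mutation).

-- string.ascii_letters
def pvAsciiLetters : List Char := ['a', 'b', 'c', 'd', 'e', 'f', 'g', 'h', 'i', 'j', 'k', 'l', 'm', 'n', 'o', 'p', 'q', 'r', 's', 't', 'u', 'v', 'w', 'x', 'y', 'z', 'A', 'B', 'C', 'D', 'E', 'F', 'G', 'H', 'I', 'J', 'K', 'L', 'M', 'N', 'O', 'P', 'Q', 'R', 'S', 'T', 'U', 'V', 'W', 'X', 'Y', 'Z']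

-- ===== PORT A =====
-- col = filter(str.isalpha, ...); row = int(filter(str.isdigit, ...)); then the loop over col.
-- Pre_ excludes the inputs where int('') raises ValueError; there the port uses getD 0.
def address2coords (cell_address : String) : Int × Int :=
  let col := cell_address.toList.filter PySem.Chars.isalpha
  let row := (PySem.Int.ofChars? (cell_address.toList.filter PySem.Chars.isdigit)).getD 0
  let num := col.foldl
    (fun num c =>
      if pvAsciiLetters.contains c then
        num * 26 + (((PySem.Chars.upperChar c).toNat : Int) - ('A'.toNat : Int)) + 1
      else num) 0
  (num, row)

-- ===== PORT B =====
-- one reversed pass; state = (num, mul, collected digit chars); digits reversed at the end.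
def address2coords_alt (cell_address : String) : Int × Int :=
  let st := cell_address.toList.reverse.foldl
    (fun (st : Int × Int × List Char) c =>
      if pvAsciiLetters.contains c then
        (st.1 + ((((PySem.Chars.upperChar c).toNat : Int) - ('A'.toNat : Int)) + 1) * st.2.1,
         st.2.1 * 26, st.2.2)
      else if PySem.Chars.isdigit c then (st.1, st.2.1, st.2.2 ++ [c])
      else st) (0, 1, [])
  (st.1, (PySem.Int.ofChars? st.2.2.reverse).getD 0)

-- ===== PRECONDITION & SPEC =====
-- Pre_ excludes inputs with no digit character, on which Python A raises ValueError (int of an empty digit string); B raises there too.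
def Pre_address2coords (cell_address : String) : Prop :=
  cell_address.toList.any PySem.Chars.isdigit = true
instance (cell_address : String) : Decidable (Pre_address2coords cell_address) := by unfold Pre_address2coords; infer_instance
def pvWitness_address2coords : String := "AA43"

def Spec_address2coords (cell_address : String) (out : Int × Int) : Prop := out = address2coords_alt cell_address
instance (cell_address : String) (out : Int × Int) : Decidable (Spec_address2coords cell_address out) := by unfold Spec_address2coords; infer_instance

-- ===== CLAIM (what is proved, stated in full; the proofs are below) =====
def Claim_equal_address2coords : Prop := ∀ (cell_address : String), Dom_address2coords cell_address → Pre_address2coords cell_address → Spec_address2coords cell_address (address2coords cell_address)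

-- ===== LEMMAS AND PROOFS =====

theorem char_eq_iff_toNat (c d : Char) : (c = d) ↔ c.toNat = d.toNat :=
  ⟨fun h => h ▸ rfl, fun h => Char.ext (UInt32.toNat_inj.mp h)⟩

theorem char_le_iff_toNat (c d : Char) : (c ≤ d) ↔ c.toNat ≤ d.toNat := by
  rw [Char.le_def, UInt32.le_iff_toNat_le]; rfl

set_option maxRecDepth 8192 in
theorem contains_eq_isalpha (c : Char) : pvAsciiLetters.contains c = PySem.Chars.isalpha c := by
  rw [Bool.eq_iff_iff]
  simp only [pvAsciiLetters, List.contains_cons, List.contains_nil, PySem.Chars.isalpha,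
    PySem.Chars.isupper, PySem.Chars.islower, Bool.or_eq_true, Bool.and_eq_true,
    beq_iff_eq, decide_eq_true_eq, char_eq_iff_toNat, char_le_iff_toNat, Bool.false_eq_true, or_false]
  simp only [Char.reduceToNat] at *
  omega

theorem isdigit_eq_false_of_isalpha (c : Char) (h : PySem.Chars.isalpha c = true) :
    PySem.Chars.isdigit c = false := by
  simp only [PySem.Chars.isalpha, PySem.Chars.isupper, PySem.Chars.islower, PySem.Chars.isdigit,
    Bool.or_eq_true, Bool.and_eq_true, Bool.and_eq_false_iff, decide_eq_true_eq,
    decide_eq_false_iff_not, char_le_iff_toNat] at *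
  simp only [Char.reduceToNat] at *
  omega

-- positional (place-value) reading of a letter list as a base-26 column number
def pvColVal : List Char → Int
  | [] => 0
  | c :: ds => ((((PySem.Chars.upperChar c).toNat : Int) - ('A'.toNat : Int)) + 1) * 26 ^ ds.length + pvColVal ds

-- A's forward Horner loop over an all-alpha list computes the positional value
theorem horner_eq_colVal (ds : List Char) (hds : ∀ c ∈ ds, PySem.Chars.isalpha c = true) :
    ∀ n : Int,
    ds.foldl
      (fun num c =>
        if pvAsciiLetters.contains c then
          num * 26 + (((PySem.Chars.upperChar c).toNat : Int) - ('A'.toNat : Int)) + 1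
        else num) n
    = n * 26 ^ ds.length + pvColVal ds := by
  induction ds with
  | nil => intro n; simp [pvColVal]
  | cons c ds ih =>
    intro n
    have hc : pvAsciiLetters.contains c = true := by
      rw [contains_eq_isalpha]; exact hds c (by simp)
    rw [List.foldl_cons, hc, if_pos rfl,
      ih (fun d hd => hds d (by simp [hd]))]
    simp only [pvColVal, List.length_cons]
    ring

-- B's reversed fold computes (positional column value, 26^#letters, reversed digit subsequence)
theorem rev_fold_eq (cs : List Char) :
    cs.reverse.foldl
      (fun (st : Int × Int × List Char) c =>
        if pvAsciiLetters.contains c then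
          (st.1 + ((((PySem.Chars.upperChar c).toNat : Int) - ('A'.toNat : Int)) + 1) * st.2.1,
           st.2.1 * 26, st.2.2)
        else if PySem.Chars.isdigit c then (st.1, st.2.1, st.2.2 ++ [c])
        else st) (0, 1, [])
    = (pvColVal (cs.filter PySem.Chars.isalpha),
       26 ^ (cs.filter PySem.Chars.isalpha).length,
       (cs.filter PySem.Chars.isdigit).reverse) := by
  rw [List.foldl_reverse]
  induction cs with
  | nil => simp [pvColVal]
  | cons c cs ih =>
    rw [List.foldr_cons, ih]
    by_cases ha : PySem.Chars.isalpha c = true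
    · have hc : pvAsciiLetters.contains c = true := by rw [contains_eq_isalpha]; exact ha
      rw [List.filter_cons_of_pos ha,
        List.filter_cons_of_neg (by simp [isdigit_eq_false_of_isalpha c ha])]
      simp only [hc, if_true, pvColVal, List.length_cons]
      refine Prod.ext ?_ (Prod.ext ?_ rfl)
      · ring
      · simp [pow_succ]
    · have ha' : PySem.Chars.isalpha c = false := by simpa using ha
      have hc : pvAsciiLetters.contains c = false := by rw [contains_eq_isalpha]; exact ha'
      rw [List.filter_cons_of_neg (by simp [ha'])]
      have hcm : c ∉ pvAsciiLetters := by simpa using hc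
      by_cases hd : PySem.Chars.isdigit c = true
      · rw [List.filter_cons_of_pos hd]
        simp [hcm, hd]
      · have hd' : PySem.Chars.isdigit c = false := by simpa using hd
        rw [List.filter_cons_of_neg (by simp [hd'])]
        simp [hcm, hd']

-- ===== VERDICT (by name: the statement is the Claim_ definition above) =====
theorem address2coords_spec : Claim_equal_address2coords := by
  intro s _ _
  unfold Spec_address2coords address2coords address2coords_alt
  rw [rev_fold_eq]
  simp only [List.reverse_reverse]
  rw [horner_eq_colVal _ (fun c hc => (List.mem_filter.mp hc).2)]
  simp
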